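-- pv_equiv track=rewrite | github.com/wizard9582/Algo | Programmers/Python/q77486_Programmers_다단계칫솔판매.py | solution
-- ===== SOURCE A (Python) =====
-- def solution(enroll, referral, seller, amount):
--     result = [0 for i in range(len(enroll))]
--     follow = [-1 for i in range(len(enroll))]
--     name_dict = {}
--
--     index = 0
--     for name in enroll:
--         name_dict[name] = index
--         index += 1
--
--     for i in range(len(referral)):
--         if referral[i] != '-':
--             target = name_dict[referral[i]]
--             follow[i] = target
--
--     for i in range(len(seller)):
--         start = name_dict[seller[i]]
--         money = amount[i] * 100
--         send_money(follow, result, money, start)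
--
--     return result
--
-- def send_money(follow, result, money, me):
--     lead = follow[me]
--     tax = int(money / 10)
--     result[me] += money - tax
--
--     if lead == -1 or tax == 0:
--         return
--     else:
--         send_money(follow, result, tax, lead)
-- ===== SOURCE B (Python) =====
-- def solution(enroll, referral, seller, amount):
--     idx = {name: i for i, name in enumerate(enroll)}
--     follow = [-1] * len(enroll)
--     for i, boss in enumerate(referral):
--         if boss != '-':
--             follow[i] = idx[boss]
--     result = [0] * len(enroll)
--     for name, a in zip(seller, amount):
--         me = idx[name]
--         money = a * 100
--         while True:
--             tax = int(money / 10)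
--             result[me] += money - tax
--             lead = follow[me]
--             if lead == -1 or tax == 0:
--                 break
--             me, money = lead, tax
--     return result
-- ===== Notes on version B (the rewrite author's own statement) =====
-- stated objective: simpler
-- what changed: The recursive send_money helper is inlined into solution as an iterative while loop walking up the follow chain, and the index dict / follow table / payout loop are built with enumerate and zip instead of range-index loops.
import Mathlib
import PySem

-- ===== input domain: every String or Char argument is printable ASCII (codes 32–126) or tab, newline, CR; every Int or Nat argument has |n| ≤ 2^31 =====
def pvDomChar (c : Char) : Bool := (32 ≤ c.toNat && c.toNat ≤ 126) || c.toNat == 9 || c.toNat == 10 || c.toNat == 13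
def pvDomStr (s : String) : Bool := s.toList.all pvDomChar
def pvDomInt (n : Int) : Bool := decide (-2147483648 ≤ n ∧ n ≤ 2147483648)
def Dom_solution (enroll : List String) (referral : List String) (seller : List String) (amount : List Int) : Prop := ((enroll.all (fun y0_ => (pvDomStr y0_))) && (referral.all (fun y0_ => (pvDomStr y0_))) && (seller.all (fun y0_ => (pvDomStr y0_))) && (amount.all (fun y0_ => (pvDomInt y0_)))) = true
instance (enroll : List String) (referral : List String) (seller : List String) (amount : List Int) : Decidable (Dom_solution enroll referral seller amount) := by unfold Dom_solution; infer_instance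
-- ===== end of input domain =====

-- B inlines the recursive send_money into an iterative chain walk and builds the index/follow
-- tables with enumerate/zip; objective: simpler (no recursion, no helper function). Same return values on Pre_.

-- ===== PORT A =====
-- termination helper for the recursive send_money (tax strictly shrinks in magnitude)
theorem pvTaxLt (m : Int) (h : PySem.Int.truncdiv m 10 ≠ 0) :
    (PySem.Int.truncdiv m 10).natAbs < m.natAbs := by
  have h1 : (m.tdiv 10).natAbs = m.natAbs / 10 := Int.natAbs_tdiv m 10
  have h2 : (m.tdiv 10).natAbs ≠ 0 := Int.natAbs_ne_zero.mpr h
  simp only [PySem.Int.truncdiv] at *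
  omega

-- send_money(follow, result, money, me); int(money / 10) is PySem.Int.truncdiv (exact: |money| < 2^53 on Dom)
def sendMoney (follow : List Int) (result : List Int) (money : Int) (me : Int) : List Int :=
  let lead := PySem.List.pyGetD follow me 0
  let tax := PySem.Int.truncdiv money 10
  let result' := PySem.List.pySetD result me (PySem.List.pyGetD result me 0 + (money - tax))
  if lead = -1 ∨ tax = 0 then result'
  else sendMoney follow result' tax lead
termination_by money.natAbs
decreasing_by exact pvTaxLt money (by tauto)

def solution (enroll : List String) (referral : List String) (seller : List String) (amount : List Int) : List Int :=
  let result : List Int := (List.range enroll.length).map (fun _ => (0 : Int))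
  let follow : List Int := (List.range enroll.length).map (fun _ => (-1 : Int))
  let nameDict := (enroll.foldl
    (fun (st : PySem.Dict String Int × Int) name => (st.1.insert name st.2, st.2 + 1))
    (PySem.Dict.empty, 0)).1
  let follow := (PySem.List.pyRange 0 (referral.length : Int) 1).foldl (fun fw i =>
      if PySem.List.pyGetD referral i "" ≠ "-" then
        let target := nameDict.getD (PySem.List.pyGetD referral i "") 0
        PySem.List.pySetD fw i target
      else fw) follow
  let result := (PySem.List.pyRange 0 (seller.length : Int) 1).foldl (fun res i =>
      let start := nameDict.getD (PySem.List.pyGetD seller i "") 0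
      let money := PySem.List.pyGetD amount i 0 * 100
      sendMoney follow res money start) result
  result

-- ===== PORT B =====
-- the while-loop of Source B as a tail recursion on the pair (me, money)
def chainWalk (follow : List Int) (result : List Int) (me : Int) (money : Int) : List Int :=
  let tax := PySem.Int.truncdiv money 10
  let result' := PySem.List.pySetD result me (PySem.List.pyGetD result me 0 + (money - tax))
  let lead := PySem.List.pyGetD follow me 0
  if lead = -1 ∨ tax = 0 then result'
  else chainWalk follow result' lead tax
termination_by money.natAbs
decreasing_by exact pvTaxLt money (by tauto)

def solution_alt (enroll : List String) (referral : List String) (seller : List String) (amount : List Int) : List Int :=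
  let idx := (PySem.List.enumerate enroll).foldl
    (fun (d : PySem.Dict String Int) p => d.insert p.2 p.1) PySem.Dict.empty
  let follow := (PySem.List.enumerate referral).foldl
    (fun fw p => if p.2 ≠ "-" then PySem.List.pySetD fw p.1 (idx.getD p.2 0) else fw)
    (List.replicate enroll.length (-1 : Int))
  (seller.zip amount).foldl
    (fun res p => chainWalk follow res (idx.getD p.1 0) (p.2 * 100))
    (List.replicate enroll.length (0 : Int))

-- ===== PRECONDITION & SPEC =====
-- Pre_ excludes exactly the inputs where A raises: a non-'-' referral entry whose position has no
-- follow slot (IndexError) or whose name is not enrolled (KeyError), a seller not enrolled (KeyError),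
-- and amount shorter than seller (IndexError).
def Pre_solution (enroll : List String) (referral : List String) (seller : List String) (amount : List Int) : Prop :=
  (∀ p ∈ PySem.List.enumerate referral, p.2 ≠ "-" → p.1 < (enroll.length : Int) ∧ p.2 ∈ enroll) ∧
  seller.length ≤ amount.length ∧ (∀ s ∈ seller, s ∈ enroll)
instance (enroll : List String) (referral : List String) (seller : List String) (amount : List Int) : Decidable (Pre_solution enroll referral seller amount) := by unfold Pre_solution; infer_instance
def pvWitness_solution : List String × List String × List String × List Int :=
  (["john", "mary"], ["-", "john"], ["mary", "mary"], [10, 5])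

def Spec_solution (enroll : List String) (referral : List String) (seller : List String) (amount : List Int) (out : List Int) : Prop := out = solution_alt enroll referral seller amount
instance (enroll : List String) (referral : List String) (seller : List String) (amount : List Int) (out : List Int) : Decidable (Spec_solution enroll referral seller amount out) := by unfold Spec_solution; infer_instance

-- ===== CLAIM (what is proved, stated in full; the proofs are below) =====
def Claim_equal_solution : Prop := ∀ (enroll : List String) (referral : List String) (seller : List String) (amount : List Int), Dom_solution enroll referral seller amount → Pre_solution enroll referral seller amount → Spec_solution enroll referral seller amount (solution enroll referral seller amount)

-- ===== LEMMAS AND PROOFS =====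

-- the two dict builds (running counter vs enumerate) produce the same dict
theorem dict_build_eq (l : List String) (d : PySem.Dict String Int) (k : Int) :
    (l.foldl (fun (st : PySem.Dict String Int × Int) name => (st.1.insert name st.2, st.2 + 1)) (d, k)).1
      = (PySem.List.enumerate l k).foldl (fun d p => d.insert p.2 p.1) d := by
  induction l generalizing d k with
  | nil => rfl
  | cons x t ih => simp only [List.foldl_cons, PySem.List.enumerate_cons]; exact ih (d.insert x k) (k + 1)

-- an index loop over a range paired with amount[i] is a zip loop, when amount is long enough
theorem range_fold_eq_zip_fold (xs : List String) (ys : List Int)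
    (h : xs.length ≤ ys.length) (g : List Int → String → Int → List Int) (init : List Int) :
    (PySem.List.pyRange 0 (xs.length : Int) 1).foldl
      (fun res i => g res (PySem.List.pyGetD xs i "") (PySem.List.pyGetD ys i 0)) init
      = (xs.zip ys).foldl (fun res p => g res p.1 p.2) init := by
  have hzip : xs.zip ys = (PySem.List.pyRange 0 (xs.length : Int) 1).map
      (fun j => (PySem.List.pyGetD xs j "", PySem.List.pyGetD ys j 0)) := by
    apply List.ext_getElem
    · simp [PySem.List.length_pyRange_one]; omega
    · intro k h1 h2
      have hk : k < xs.length := by simp at h1; omega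
      have hky : k < ys.length := by omega
      simp only [List.getElem_zip, List.getElem_map, PySem.List.getElem_pyRange_one]
      rw [show ((0 : Int) + (k : Int)) = ((k : Nat) : Int) by omega]
      simp [PySem.List.pyGetD_natCast, List.getD_eq_getElem?_getD, hk, hky]
  rw [hzip, List.foldl_map]

-- the two chain updaters compute the same list
theorem chainWalk_eq_sendMoney (follow result : List Int) (money me : Int) :
    chainWalk follow result me money = sendMoney follow result money me := by
  fun_induction chainWalk follow result me money with
  | case1 r m mo tax result' lead hstop =>
      rw [sendMoney, if_pos hstop]
  | case2 r m mo tax result' lead hstop ih =>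
      rw [sendMoney, if_neg hstop, ih]

-- ===== VERDICT (by name: the statement is the Claim_ definition above) =====
theorem solution_spec : Claim_equal_solution := by
  intro enroll referral seller amount _hdom hpre
  obtain ⟨_h1, h2, _h3⟩ := hpre
  show solution enroll referral seller amount = solution_alt enroll referral seller amount
  simp only [solution, solution_alt]
  rw [← dict_build_eq enroll PySem.Dict.empty 0]
  rw [PySem.List.enumerate_eq_map_pyRange referral "", List.foldl_map]
  simp only [List.map_const', List.length_range, PySem.List.len_eq]
  generalize (List.foldl (fun (st : PySem.Dict String Int × Int) name => (st.1.insert name st.2, st.2 + 1)) (PySem.Dict.empty, 0) enroll).1 = nd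
  generalize ((PySem.List.pyRange 0 (referral.length : Int) 1).foldl (fun fw i =>
      if PySem.List.pyGetD referral i "" ≠ "-" then
        PySem.List.pySetD fw i (nd.getD (PySem.List.pyGetD referral i "") 0)
      else fw) (List.replicate enroll.length (-1 : Int))) = F
  have hz := range_fold_eq_zip_fold seller amount h2
      (fun res s a => sendMoney F res (a * 100) (nd.getD s 0)) (List.replicate enroll.length 0)
  simp only [] at hz
  rw [hz]
  exact PySem.List.foldl_congr_mem _ _ _ _
    (fun acc p _ => (chainWalk_eq_sendMoney F acc (p.2 * 100) (nd.getD p.1 0)).symm)
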